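-- pv_equiv track=rewrite | github.com/HadrienG/wiz | wiz/qc/tetra.py | tetra_manhattan_distance
-- ===== SOURCE A (Python) =====
-- def tetra_manhattan_distance(seq1={}, seq2={}):
--     # https://fr.wikipedia.org/wiki/Distance_de_Manhattan
--     dimensions = [key for key in seq1.keys()]
--     for key in seq2.keys():
--         if key not in dimensions:
--             dimensions.append(key)
--     total = 0
--     for dim in dimensions:
--         val_seq1, val_seq2 = 0, 0
--         if dim in seq1.keys():
--             val_seq1 = seq1[dim]
--         if dim in seq2.keys():
--             val_seq2 = seq2[dim]
--         total += abs(val_seq2-val_seq1)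
--     return total
-- ===== SOURCE B (Python) =====
-- def tetra_manhattan_distance(seq1={}, seq2={}):
--     # two passes, no union key list and no list-membership scans
--     total = 0
--     for k, v in seq1.items():
--         total += abs(seq2.get(k, 0) - v)
--     for k, v in seq2.items():
--         if k not in seq1:
--             total += abs(v)
--     return total
-- ===== Notes on version B (the rewrite author's own statement) =====
-- stated objective: faster
-- what changed: B never materializes the union key list or tests membership in a growing Python list: it makes two direct passes over the dict items (seq1 with seq2.get(k,0), then seq2 entries whose key is absent from seq1), so every quadratic 'key in list' scan disappears.
import Mathlib
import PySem

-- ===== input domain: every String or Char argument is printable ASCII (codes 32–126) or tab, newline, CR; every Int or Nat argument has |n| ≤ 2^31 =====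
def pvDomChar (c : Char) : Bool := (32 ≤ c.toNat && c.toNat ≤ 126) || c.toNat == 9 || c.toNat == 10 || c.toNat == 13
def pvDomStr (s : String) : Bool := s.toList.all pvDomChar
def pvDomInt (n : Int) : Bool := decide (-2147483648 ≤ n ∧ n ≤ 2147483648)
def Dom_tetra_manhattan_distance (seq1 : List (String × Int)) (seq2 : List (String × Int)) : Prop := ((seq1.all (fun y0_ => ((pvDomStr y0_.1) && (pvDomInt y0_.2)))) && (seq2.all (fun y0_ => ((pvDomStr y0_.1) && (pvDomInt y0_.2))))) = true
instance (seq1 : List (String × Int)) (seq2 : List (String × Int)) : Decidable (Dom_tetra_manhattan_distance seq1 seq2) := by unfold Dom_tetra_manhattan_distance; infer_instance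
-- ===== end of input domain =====

-- B replaces A's union-of-keys list and its quadratic list-membership scans by two direct
-- passes over the items of seq1 and seq2 (objective: faster, measured).


-- ===== PORT A =====
-- seq1[dim] on a dict = first (unique) matching value in the association list
def pvGetD (d : List (String × Int)) (k : String) : Int :=
  ((d.find? (fun p => p.1 == k)).map (·.2)).getD 0

def tetra_manhattan_distance (seq1 : List (String × Int)) (seq2 : List (String × Int)) : Int :=
  -- dimensions = [key for key in seq1.keys()]; then append seq2 keys not yet present
  let dimensions :=
    seq2.foldl (fun acc p => if p.1 ∈ acc then acc else acc ++ [p.1]) (seq1.map (·.1))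
  -- total loop: membership tests against the key views, then the indexed lookups
  dimensions.foldl
    (fun total dim =>
      let val_seq1 : Int := if dim ∈ seq1.map (·.1) then pvGetD seq1 dim else 0
      let val_seq2 : Int := if dim ∈ seq2.map (·.1) then pvGetD seq2 dim else 0
      total + |val_seq2 - val_seq1|) 0

-- ===== PORT B =====
def tetra_manhattan_distance_alt (seq1 : List (String × Int)) (seq2 : List (String × Int)) : Int :=
  -- pass 1: every item of seq1 against seq2.get(k, 0)
  let t1 := seq1.foldl (fun total p => total + |pvGetD seq2 p.1 - p.2|) 0
  -- pass 2: items of seq2 whose key is not in seq1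
  seq2.foldl (fun total p =>
    if (seq1.find? (fun q => q.1 == p.1)).isSome then total else total + |p.2|) t1

-- ===== PRECONDITION & SPEC =====
-- Pre_ says the association lists model Python dicts: keys are distinct. The Python A only
-- ever receives dicts, whose keys are always distinct, so no input A accepts is excluded.
def Pre_tetra_manhattan_distance (seq1 : List (String × Int)) (seq2 : List (String × Int)) : Prop :=
  (seq1.map (·.1)).Nodup ∧ (seq2.map (·.1)).Nodup
instance (seq1 : List (String × Int)) (seq2 : List (String × Int)) : Decidable (Pre_tetra_manhattan_distance seq1 seq2) := by unfold Pre_tetra_manhattan_distance; infer_instance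

def pvWitness_tetra_manhattan_distance : (List (String × Int)) × (List (String × Int)) :=
  ([("a", 3), ("b", -2)], [("a", -1), ("c", 5)])

def Spec_tetra_manhattan_distance (seq1 : List (String × Int)) (seq2 : List (String × Int)) (out : Int) : Prop := out = tetra_manhattan_distance_alt seq1 seq2
instance (seq1 : List (String × Int)) (seq2 : List (String × Int)) (out : Int) : Decidable (Spec_tetra_manhattan_distance seq1 seq2 out) := by unfold Spec_tetra_manhattan_distance; infer_instance

-- ===== CLAIM (what is proved, stated in full; the proofs are below) =====
def Claim_equal_tetra_manhattan_distance : Prop := ∀ (seq1 : List (String × Int)) (seq2 : List (String × Int)), Dom_tetra_manhattan_distance seq1 seq2 → Pre_tetra_manhattan_distance seq1 seq2 → Spec_tetra_manhattan_distance seq1 seq2 (tetra_manhattan_distance seq1 seq2)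

-- ===== LEMMAS AND PROOFS =====

-- with distinct keys, find? on the key of a member returns that member
theorem find?_of_mem_nodup (l : List (String × Int)) (p : String × Int)
    (hn : (l.map (·.1)).Nodup) (hp : p ∈ l) :
    l.find? (fun q => q.1 == p.1) = some p := by
  induction l with
  | nil => cases hp
  | cons a t ih =>
    simp only [List.map_cons, List.nodup_cons] at hn
    rcases List.mem_cons.mp hp with h | h
    · subst h; simp [List.find?]
    · have hne : (a.1 == p.1) = false := by
        simp only [beq_eq_false_iff_ne]
        intro he
        exact hn.1 (he ▸ List.mem_map_of_mem h)
      simp [List.find?, hne, ih hn.2 h]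

-- a sum-accumulating foldl is init plus the sum of the mapped list
theorem foldl_add_sum (l : List (String × Int)) (f : String × Int → Int) (init : Int) :
    l.foldl (fun t p => t + f p) init = init + (l.map f).sum := by
  induction l generalizing init with
  | nil => simp
  | cons a t ih => simp [List.foldl_cons, ih, add_assoc]

theorem foldl_add_sum_str (l : List String) (f : String → Int) (init : Int) :
    l.foldl (fun t k => t + f k) init = init + (l.map f).sum := by
  induction l generalizing init with
  | nil => simp
  | cons a t ih => simp [List.foldl_cons, ih, add_assoc]

-- the conditional accumulation is the sum over the filtered list
theorem foldl_if_add_sum (l : List (String × Int)) (c : String × Int → Bool)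
    (f : String × Int → Int) (init : Int) :
    l.foldl (fun t p => if c p then t else t + f p) init
      = init + ((l.filter (fun p => !c p)).map f).sum := by
  induction l generalizing init with
  | nil => simp
  | cons a t ih =>
    cases hc : c a <;> simp [List.foldl_cons, hc, ih, add_assoc]

-- the key-collection loop appends exactly the keys not already in the accumulator
theorem foldl_collect (l : List (String × Int)) (acc : List String)
    (hn : (l.map (·.1)).Nodup) :
    l.foldl (fun a p => if p.1 ∈ a then a else a ++ [p.1]) acc
      = acc ++ (l.map (·.1)).filter (fun k => !decide (k ∈ acc)) := by
  induction l generalizing acc with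
  | nil => simp
  | cons a t ih =>
    simp only [List.map_cons, List.nodup_cons] at hn
    by_cases h : a.1 ∈ acc
    · rw [List.foldl_cons, if_pos h, ih acc hn.2]
      simp [h]
    · have hf : (t.map (·.1)).filter (fun k => !decide (k ∈ acc ++ [a.1]))
          = (t.map (·.1)).filter (fun k => !decide (k ∈ acc)) := by
        apply List.filter_congr
        intro k hk
        have : k ≠ a.1 := fun he => hn.1 (he ▸ hk)
        simp [List.mem_append, this]
      rw [List.foldl_cons, if_neg h, ih (acc ++ [a.1]) hn.2, hf]
      simp [h]

-- a key absent from the list looks up as 0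
theorem pvGetD_of_not_mem (l : List (String × Int)) (k : String)
    (h : k ∉ l.map (·.1)) : pvGetD l k = 0 := by
  have : l.find? (fun q => q.1 == k) = none := by
    rw [List.find?_eq_none]
    intro q hq hbe
    exact h ((eq_of_beq hbe) ▸ List.mem_map_of_mem hq)
  simp [pvGetD, this]

-- find?-isSome is key membership
theorem contains_eq_mem (l : List (String × Int)) (k : String) :
    (l.find? (fun q => q.1 == k)).isSome = decide (k ∈ l.map (·.1)) := by
  rcases h : (l.find? (fun q => q.1 == k)) with _ | q
  · have hnm : k ∉ l.map (·.1) := by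
      intro hm
      rcases List.mem_map.mp hm with ⟨p, hp, he⟩
      exact (List.find?_eq_none.mp h) p hp (by simp [he])
    rw [h]
    simp [hnm]
  · have hq := List.find?_some h
    have hm := List.mem_of_find?_eq_some h
    have : k ∈ l.map (·.1) := List.mem_map.mpr ⟨q, hm, eq_of_beq hq⟩
    rw [h]
    simp [this]

theorem tetra_eq (seq1 seq2 : List (String × Int))
    (h1 : (seq1.map (·.1)).Nodup) (h2 : (seq2.map (·.1)).Nodup) :
    tetra_manhattan_distance seq1 seq2 = tetra_manhattan_distance_alt seq1 seq2 := by
  unfold tetra_manhattan_distance tetra_manhattan_distance_alt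
  show (seq2.foldl (fun acc p => if p.1 ∈ acc then acc else acc ++ [p.1]) (seq1.map (·.1))).foldl
      (fun total dim => total +
        |(if dim ∈ seq2.map (·.1) then pvGetD seq2 dim else 0) -
         (if dim ∈ seq1.map (·.1) then pvGetD seq1 dim else 0)|) 0
    = seq2.foldl (fun total p =>
        if (seq1.find? (fun q => q.1 == p.1)).isSome then total else total + |p.2|)
        (seq1.foldl (fun total p => total + |pvGetD seq2 p.1 - p.2|) 0)
  rw [foldl_collect seq2 (seq1.map (·.1)) h2, List.foldl_append,
      foldl_add_sum_str, foldl_add_sum_str, foldl_add_sum, foldl_if_add_sum]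
  have e1 : (seq1.map (·.1)).map
      (fun dim => |(if dim ∈ seq2.map (·.1) then pvGetD seq2 dim else 0) -
        (if dim ∈ seq1.map (·.1) then pvGetD seq1 dim else 0)|)
      = seq1.map (fun p => |pvGetD seq2 p.1 - p.2|) := by
    rw [List.map_map]
    apply List.map_congr_left
    intro p hp
    have hm1 : p.1 ∈ seq1.map (·.1) := List.mem_map_of_mem hp
    have hv1 : pvGetD seq1 p.1 = p.2 := by
      simp [pvGetD, find?_of_mem_nodup seq1 p h1 hp]
    by_cases hm2 : p.1 ∈ seq2.map (·.1)
    · simp [hm1, hm2, hv1]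
    · simp [hm1, hm2, hv1, pvGetD_of_not_mem seq2 p.1 hm2]
  have e2 : (((seq2.map (·.1)).filter (fun k => !decide (k ∈ seq1.map (·.1)))).map
      (fun dim => |(if dim ∈ seq2.map (·.1) then pvGetD seq2 dim else 0) -
        (if dim ∈ seq1.map (·.1) then pvGetD seq1 dim else 0)|)).sum
      = ((seq2.filter (fun p => !(seq1.find? (fun q => q.1 == p.1)).isSome)).map
          (fun p => |p.2|)).sum := by
    have hfm : (seq2.map (·.1)).filter (fun k => !decide (k ∈ seq1.map (·.1)))
        = (seq2.filter (fun p => !(seq1.find? (fun q => q.1 == p.1)).isSome)).map (·.1) := by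
      rw [List.filter_map]
      congr 1
      apply List.filter_congr
      intro p _
      simp [Function.comp, contains_eq_mem]
    rw [hfm, List.map_map]
    congr 1
    apply List.map_congr_left
    intro p hp
    have hp2 := List.mem_filter.mp hp
    have hnm : p.1 ∉ seq1.map (·.1) := by
      have := hp2.2
      rw [Bool.not_eq_eq_eq_not] at this
      simpa [contains_eq_mem] using this
    have hv2 : pvGetD seq2 p.1 = p.2 := by
      simp [pvGetD, find?_of_mem_nodup seq2 p h2 hp2.1]
    have hm2 : p.1 ∈ seq2.map (·.1) := List.mem_map_of_mem hp2.1
    simp [Function.comp, hnm, hm2, hv2]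
  rw [e1]
  rw [e2]

-- ===== VERDICT (by name: the statement is the Claim_ definition above) =====
theorem tetra_manhattan_distance_spec : Claim_equal_tetra_manhattan_distance := by
  intro seq1 seq2 _ hpre
  exact tetra_eq seq1 seq2 hpre.1 hpre.2
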